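-- pv_equiv track=rewrite | github.com/bee4come/QuantRift-hackathon | backend/src/export/export_quant_pack.py | _infer_entity_type
-- ===== SOURCE A (Python) =====
-- from typing import Dict, List, Any, Optional, Union
--
-- def _infer_entity_type(record: Dict[str, Any]) -> str:
--     """Infer entity type from record content"""
--     if 'champion_name' in record or 'champion_id' in record:
--         return 'champion'
--     elif 'item_id' in record or any('item' in str(k).lower() for k in record.keys()):
--         return 'item'
--     elif 'rune_id' in record or any('rune' in str(k).lower() for k in record.keys()):
--         return 'rune'
--     elif 'patch' in record or any('patch' in str(k).lower() for k in record.keys()):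
--         return 'patch'
--     else:
--         return 'meta'
-- ===== SOURCE B (Python) =====
-- _LEVEL_NAMES = ['champion', 'item', 'rune', 'patch', 'meta']
--
-- def _key_level(k):
--     """Priority level of a single key (0 highest .. 4 none)."""
--     if k in ('champion_name', 'champion_id'):
--         return 0
--     lk = str(k).lower()
--     if 'item' in lk:
--         return 1
--     if 'rune' in lk:
--         return 2
--     if 'patch' in lk:
--         return 3
--     return 4
--
-- def _infer_entity_type(record):
--     """Infer entity type from record content (min-priority single pass)."""
--     best = 4
--     for k in record.keys():
--         best = min(best, _key_level(k))
--     return _LEVEL_NAMES[best]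
-- ===== Notes on version B (the rewrite author's own statement) =====
-- stated objective: simpler
-- what changed: Replaces the cascade of four full scans over the keys by a single pass that keeps the minimum per-key priority level (0=champion..4=meta) and indexes a name table; the exact item_id/rune_id/patch tests are subsumed by the substring tests.
import Mathlib
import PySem

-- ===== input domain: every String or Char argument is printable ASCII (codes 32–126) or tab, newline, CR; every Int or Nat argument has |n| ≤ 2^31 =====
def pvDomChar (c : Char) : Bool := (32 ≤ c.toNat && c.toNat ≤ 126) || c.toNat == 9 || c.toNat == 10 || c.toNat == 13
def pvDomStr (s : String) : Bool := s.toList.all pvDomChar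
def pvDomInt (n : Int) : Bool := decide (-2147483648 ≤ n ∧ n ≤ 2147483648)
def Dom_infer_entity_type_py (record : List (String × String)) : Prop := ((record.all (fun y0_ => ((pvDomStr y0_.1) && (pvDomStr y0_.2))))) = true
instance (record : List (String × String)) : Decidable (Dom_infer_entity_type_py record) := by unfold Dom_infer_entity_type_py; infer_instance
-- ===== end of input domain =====

-- B replaces A's cascade of four full key scans by one pass that keeps the minimum
-- priority level per key (0=champion .. 4=meta) and indexes a name table; same cost, simpler.


-- ===== PORT A =====
-- literal transliteration of the if/elif cascade; 'k in record' is dict-key membership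
def infer_entity_type_py (record : List (String × String)) : String :=
  if record.any (fun p => p.1 == "champion_name") || record.any (fun p => p.1 == "champion_id") then
    "champion"
  else if record.any (fun p => p.1 == "item_id") ||
      record.any (fun p => PySem.Str.isIn "item" (PySem.Str.lower p.1)) then
    "item"
  else if record.any (fun p => p.1 == "rune_id") ||
      record.any (fun p => PySem.Str.isIn "rune" (PySem.Str.lower p.1)) then
    "rune"
  else if record.any (fun p => p.1 == "patch") ||
      record.any (fun p => PySem.Str.isIn "patch" (PySem.Str.lower p.1)) then
    "patch"
  else
    "meta"

-- ===== PORT B =====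
def pvLevelNames : List String := ["champion", "item", "rune", "patch", "meta"]

-- priority level of a single key (0 highest .. 4 none)
def pvKeyLevel (k : String) : Nat :=
  if k == "champion_name" || k == "champion_id" then 0
  else if PySem.Str.isIn "item" (PySem.Str.lower k) then 1
  else if PySem.Str.isIn "rune" (PySem.Str.lower k) then 2
  else if PySem.Str.isIn "patch" (PySem.Str.lower k) then 3
  else 4

def infer_entity_type_py_alt (record : List (String × String)) : String :=
  pvLevelNames.getD (record.foldl (fun best p => min best (pvKeyLevel p.1)) 4) "meta"

-- ===== PRECONDITION & SPEC =====
def Spec_infer_entity_type_py (record : List (String × String)) (out : String) : Prop := out = infer_entity_type_py_alt record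
instance (record : List (String × String)) (out : String) : Decidable (Spec_infer_entity_type_py record out) := by unfold Spec_infer_entity_type_py; infer_instance

-- ===== CLAIM (what is proved, stated in full; the proofs are below) =====
def Claim_equal_infer_entity_type_py : Prop := ∀ (record : List (String × String)), Dom_infer_entity_type_py record → Spec_infer_entity_type_py record (infer_entity_type_py record)

-- ===== LEMMAS AND PROOFS =====

-- the fold with the min accumulator, named for the lemmas
def pvMinLevel (record : List (String × String)) : Nat :=
  record.foldl (fun best p => min best (pvKeyLevel p.1)) 4

lemma pvKeyLevel_le (k : String) : pvKeyLevel k ≤ 4 := by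
  unfold pvKeyLevel; split_ifs <;> omega

lemma pvFold_min (record : List (String × String)) (b : Nat) (hb : b ≤ 4) :
    record.foldl (fun best p => min best (pvKeyLevel p.1)) b = min b (pvMinLevel record) := by
  induction record generalizing b with
  | nil => simp [pvMinLevel]; omega
  | cons p rest ih =>
      have h1 := pvKeyLevel_le p.1
      simp only [pvMinLevel, List.foldl_cons]
      rw [ih (min b (pvKeyLevel p.1)) (by omega), ih (min 4 (pvKeyLevel p.1)) (by omega)]
      omega

-- any of a pointwise disjunction splits into two anys
lemma pvAnyOr {a : Type} (l : List a) (f g : a -> Bool) :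
    (l.any fun x => f x || g x) = (l.any f || l.any g) := by
  induction l with
  | nil => simp
  | cons x l ih =>
      simp only [List.any_cons, ih]
      cases f x <;> cases g x <;> simp

-- an exact hit on "item_id" etc. is subsumed by the substring test on the same key
lemma pvItemCond (k : String) :
    (k == "item_id" || PySem.Str.isIn "item" (PySem.Str.lower k)) =
      PySem.Str.isIn "item" (PySem.Str.lower k) := by
  by_cases h : k = "item_id"
  · subst h; decide
  · simp [h]

lemma pvRuneCond (k : String) :
    (k == "rune_id" || PySem.Str.isIn "rune" (PySem.Str.lower k)) =
      PySem.Str.isIn "rune" (PySem.Str.lower k) := by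
  by_cases h : k = "rune_id"
  · subst h; decide
  · simp [h]

lemma pvPatchCond (k : String) :
    (k == "patch" || PySem.Str.isIn "patch" (PySem.Str.lower k)) =
      PySem.Str.isIn "patch" (PySem.Str.lower k) := by
  by_cases h : k = "patch"
  · subst h; decide
  · simp [h]

-- the min of the per-key levels equals the cascade on the substring-only conditions
lemma pvMinLevel_eq (record : List (String × String)) :
    pvMinLevel record =
      (if record.any (fun p => p.1 == "champion_name" || p.1 == "champion_id") then 0
       else if record.any (fun p => PySem.Str.isIn "item" (PySem.Str.lower p.1)) then 1
       else if record.any (fun p => PySem.Str.isIn "rune" (PySem.Str.lower p.1)) then 2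
       else if record.any (fun p => PySem.Str.isIn "patch" (PySem.Str.lower p.1)) then 3
       else 4) := by
  induction record with
  | nil => simp [pvMinLevel]
  | cons p rest ih =>
      have hstep : pvMinLevel (p :: rest) = min (pvKeyLevel p.1) (pvMinLevel rest) := by
        simp only [pvMinLevel, List.foldl_cons]
        rw [pvFold_min rest (min 4 (pvKeyLevel p.1)) (by omega)]
        have := pvKeyLevel_le p.1
        simp only [pvMinLevel]
        omega
      rw [hstep, ih]
      unfold pvKeyLevel
      cases hc : (p.1 == "champion_name" || p.1 == "champion_id") <;>
        cases hi : PySem.Str.isIn "item" (PySem.Str.lower p.1) <;>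
        cases hr : PySem.Str.isIn "rune" (PySem.Str.lower p.1) <;>
        cases hp : PySem.Str.isIn "patch" (PySem.Str.lower p.1) <;>
        simp only [List.any_cons, hc, hi, hr, hp, Bool.false_or, Bool.true_or, if_true, if_false,
          Bool.false_eq_true] <;>
        split_ifs <;> omega

-- ===== VERDICT (by name: the statement is the Claim_ definition above) =====
theorem infer_entity_type_py_spec : Claim_equal_infer_entity_type_py := by
  intro record _
  unfold Spec_infer_entity_type_py infer_entity_type_py infer_entity_type_py_alt
  have hm : record.foldl (fun best p => min best (pvKeyLevel p.1)) 4 = pvMinLevel record := rfl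
  rw [hm, pvMinLevel_eq record]
  have hchamp : (record.any (fun p => p.1 == "champion_name") ||
      record.any (fun p => p.1 == "champion_id")) =
      record.any (fun p => p.1 == "champion_name" || p.1 == "champion_id") := by
    rw [pvAnyOr]
  have hitem : (record.any (fun p => p.1 == "item_id") ||
      record.any (fun p => PySem.Str.isIn "item" (PySem.Str.lower p.1))) =
      record.any (fun p => PySem.Str.isIn "item" (PySem.Str.lower p.1)) := by
    rw [← pvAnyOr]; simp only [pvItemCond]
  have hrune : (record.any (fun p => p.1 == "rune_id") ||
      record.any (fun p => PySem.Str.isIn "rune" (PySem.Str.lower p.1))) =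
      record.any (fun p => PySem.Str.isIn "rune" (PySem.Str.lower p.1)) := by
    rw [← pvAnyOr]; simp only [pvRuneCond]
  have hpatch : (record.any (fun p => p.1 == "patch") ||
      record.any (fun p => PySem.Str.isIn "patch" (PySem.Str.lower p.1))) =
      record.any (fun p => PySem.Str.isIn "patch" (PySem.Str.lower p.1)) := by
    rw [← pvAnyOr]; simp only [pvPatchCond]
  rw [hchamp, hitem, hrune, hpatch]
  split_ifs <;> rfl
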